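-- pv_equiv track=rewrite | github.com/95346725/MFF_Python_Exercises | 12 Prefix, Infix, Postfix notation.py | reverseInfix
-- ===== SOURCE A (Python) =====
-- def reverseInfix(expr):
--     rev=""
--     for i in expr:
--         if i is '(':
--             i=')'
--         elif i is ')':
--             i='('
--         rev=i+rev
--     return rev
-- ===== SOURCE B (Python) =====
-- _SWAP = str.maketrans("()", ")(")
--
-- def reverseInfix(expr):
--     return expr.translate(_SWAP)[::-1]
-- ===== Notes on version B (the rewrite author's own statement) =====
-- stated objective: idiomatic
-- what changed: Replaces the fused char-by-char loop (conditional swap + string prepend) with two batch stages: a translation table via str.maketrans applied in one pass, then a slice reversal.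
import Mathlib
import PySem

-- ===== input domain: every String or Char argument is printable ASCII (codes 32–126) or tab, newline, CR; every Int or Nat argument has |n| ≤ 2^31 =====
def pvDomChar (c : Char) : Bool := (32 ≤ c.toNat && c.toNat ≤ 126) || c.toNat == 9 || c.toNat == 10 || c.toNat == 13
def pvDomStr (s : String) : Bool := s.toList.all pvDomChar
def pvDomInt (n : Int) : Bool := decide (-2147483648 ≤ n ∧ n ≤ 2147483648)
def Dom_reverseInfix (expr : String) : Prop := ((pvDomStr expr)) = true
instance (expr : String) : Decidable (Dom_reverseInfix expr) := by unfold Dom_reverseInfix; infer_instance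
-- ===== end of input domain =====

-- B: two batch stages (translation table, then slice reversal) instead of A's fused loop with string prepend (idiomatic).
-- ===== PORT A =====
def reverseInfix (expr : String) : String :=
  String.mk (expr.toList.foldl (fun rev i =>
    (if i = '(' then ')' else if i = ')' then '(' else i) :: rev) [])

-- ===== PORT B =====
-- translation table "()" -> ")(" as a function
def pvSwapTable (c : Char) : Char :=
  if c = '(' then ')' else if c = ')' then '(' else c

def reverseInfix_alt (expr : String) : String :=
  String.mk ((expr.toList.map pvSwapTable).reverse)

-- ===== PRECONDITION & SPEC =====
def Spec_reverseInfix (expr : String) (out : String) : Prop := out = reverseInfix_alt expr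
instance (expr : String) (out : String) : Decidable (Spec_reverseInfix expr out) := by unfold Spec_reverseInfix; infer_instance

-- ===== CLAIM (what is proved, stated in full; the proofs are below) =====
def Claim_equal_reverseInfix : Prop := ∀ (expr : String), Dom_reverseInfix expr → Spec_reverseInfix expr (reverseInfix expr)

-- ===== LEMMAS AND PROOFS =====

-- ===== VERDICT (by name: the statement is the Claim_ definition above) =====
theorem pv_foldl_prepend (f : Char → Char) : ∀ (l acc : List Char),
    l.foldl (fun rev i => f i :: rev) acc = (l.map f).reverse ++ acc := by
  intro l
  induction l with
  | nil => intro acc; simp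
  | cons h t ih => intro acc; simp [List.foldl, ih]

theorem reverseInfix_spec : Claim_equal_reverseInfix := by
  intro expr _
  unfold Spec_reverseInfix reverseInfix reverseInfix_alt pvSwapTable
  rw [pv_foldl_prepend]
  simp
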